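-- pv_equiv track=rewrite | github.com/ome/omero-scripts | omero/figure_scripts/Movie_ROI_Figure.py | get_time_indexes
-- ===== SOURCE A (Python) =====
-- def get_time_indexes(time_points, max_frames):
--     """
--     If we want to display a number of timepoints (e.g. 11), without exceeding
--     max_frames (e.g. 5), need to pick a selection of t-indexes e.g. 0, 2, 4, 7,
--     10
--     This method returns the list of indexes. NB - Not used at present - but
--     might be needed.
--     """
--     frames = min(max_frames, time_points)
--     interval_count = frames-1
--     smallest_interval = (time_points-1)//interval_count
--     # make a list of intervals, making the last intervals bigger if needed
--     intervals = [smallest_interval] * interval_count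
--     extra = (time_points-1) % interval_count
--     for e in range(extra):
--         last_index = -(e+1)
--         intervals[last_index] += 1
--     # convert the list of intervals into indexes.
--     indexes = []
--     time = 0
--     indexes.append(time)
--     for i in range(frames-1):
--         time += intervals[i]
--         indexes.append(time)
--     return indexes
-- ===== SOURCE B (Python) =====
-- def get_time_indexes(time_points, max_frames):
--     frames = min(max_frames, time_points)
--     m = frames - 1
--     smallest = (time_points - 1) // m
--     extra = (time_points - 1) % m
--     threshold = m - extra
--     # index 0 is always selected; each later index comes directly from the closed form
--     return [0] + [i * smallest + max(0, i - threshold) for i in range(1, frames)]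
-- ===== Notes on version B (the rewrite author's own statement) =====
-- stated objective: simpler
-- what changed: B replaces A's intervals table (built, then patched by a loop over the extra remainder) and the running cumulative-sum accumulator with a single per-index closed-form formula i*smallest + max(0, i - threshold) after the always-selected index 0.
import Mathlib
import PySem

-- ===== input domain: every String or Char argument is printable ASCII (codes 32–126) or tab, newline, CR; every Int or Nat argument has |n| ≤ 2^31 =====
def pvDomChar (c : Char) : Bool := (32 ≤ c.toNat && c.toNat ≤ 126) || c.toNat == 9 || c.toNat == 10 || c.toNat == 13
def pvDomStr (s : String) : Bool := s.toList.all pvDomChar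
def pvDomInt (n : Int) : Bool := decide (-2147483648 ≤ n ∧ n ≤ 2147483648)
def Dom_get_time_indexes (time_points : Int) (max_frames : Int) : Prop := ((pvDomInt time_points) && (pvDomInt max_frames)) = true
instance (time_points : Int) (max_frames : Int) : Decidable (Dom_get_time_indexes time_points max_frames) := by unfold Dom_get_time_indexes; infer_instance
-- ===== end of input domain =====

-- B replaces A's intervals table and running cumulative sum with a per-index closed-form formula (objective: simpler).

-- ===== PORT A =====
def get_time_indexes (time_points : Int) (max_frames : Int) : List Int :=
  let frames := min max_frames time_points
  let interval_count := frames - 1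
  let smallest_interval := PySem.Int.floordiv (time_points - 1) interval_count
  let intervals := List.replicate interval_count.toNat smallest_interval
  let extra := PySem.Int.mod (time_points - 1) interval_count
  let intervals := (PySem.List.pyRange 0 extra 1).foldl
    (fun iv e =>
      let last_index := -(e + 1)
      PySem.List.pySetD iv last_index (PySem.List.pyGetD iv last_index 0 + 1)) intervals
  let st := (PySem.List.pyRange 0 (frames - 1) 1).foldl
    (fun (st : Int × List Int) i =>
      let time := st.1 + PySem.List.pyGetD intervals i 0
      (time, st.2 ++ [time])) (0, [(0 : Int)])
  st.2

-- ===== PORT B =====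
def get_time_indexes_alt (time_points : Int) (max_frames : Int) : List Int :=
  let frames := min max_frames time_points
  let m := frames - 1
  let smallest := PySem.Int.floordiv (time_points - 1) m
  let extra := PySem.Int.mod (time_points - 1) m
  let threshold := m - extra
  [(0:Int)] ++ (PySem.List.pyRange 1 frames 1).map (fun i => i * smallest + max 0 (i - threshold))

-- ===== PRECONDITION & SPEC =====
-- Pre_ excludes exactly the inputs with min(time_points, max_frames) == 1, on which A (and B, at
-- the same division) raises ZeroDivisionError; A returns normally everywhere else.
def Pre_get_time_indexes (time_points : Int) (max_frames : Int) : Prop :=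
  min time_points max_frames ≠ 1
instance (time_points : Int) (max_frames : Int) : Decidable (Pre_get_time_indexes time_points max_frames) := by unfold Pre_get_time_indexes; infer_instance
def pvWitness_get_time_indexes : Int × Int := (11, 5)

def Spec_get_time_indexes (time_points : Int) (max_frames : Int) (out : List Int) : Prop := out = get_time_indexes_alt time_points max_frames
instance (time_points : Int) (max_frames : Int) (out : List Int) : Decidable (Spec_get_time_indexes time_points max_frames out) := by unfold Spec_get_time_indexes; infer_instance

-- ===== CLAIM (what is proved, stated in full; the proofs are below) =====
def Claim_equal_get_time_indexes : Prop := ∀ (time_points : Int) (max_frames : Int), Dom_get_time_indexes time_points max_frames → Pre_get_time_indexes time_points max_frames → Spec_get_time_indexes time_points max_frames (get_time_indexes time_points max_frames)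

-- ===== LEMMAS AND PROOFS =====
theorem pv_pySetD_neg_natCast {α : Type} (xs : List α) (k : Nat) (v : α) (h1 : 0 < k) (h2 : k ≤ xs.length) :
    PySem.List.pySetD xs (-(k:Int)) v = xs.set (xs.length - k) v := by
  have hk2 : -((xs.length:Int)) ≤ -(k:Int) := by omega
  have hne : k ≠ 0 := by omega
  simp [PySem.List.pySetD, PySem.List.pySet?, PySem.List.pyIdx?, hk2, hne]

theorem pv_intervals_fold (s : Int) : ∀ (E M : Nat), E ≤ M →
    (PySem.List.pyRange 0 (E:Int) 1).foldl
      (fun iv e => PySem.List.pySetD iv (-(e+1)) (PySem.List.pyGetD iv (-(e+1)) 0 + 1))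
      (List.replicate M s)
    = List.replicate (M-E) s ++ List.replicate E (s+1) := by
  intro E
  induction E with
  | zero => intro M _; simp [PySem.List.pyRange_one_eq_nil]
  | succ E ih =>
    intro M hEM
    have hcast : ((E+1 : Nat) : Int) = (E:Int) + 1 := by push_cast; ring
    rw [hcast, PySem.List.pyRange_one_succ_right (by positivity), List.foldl_append,
      ih M (by omega)]
    simp only [List.foldl_cons, List.foldl_nil]
    set L := List.replicate (M-E) s ++ List.replicate E (s+1) with hL
    have hlen : L.length = M := by simp [hL]; omega
    have hneg : -((E:Int) + 1) = -(((E+1:Nat)):Int) := by push_cast; ring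
    have hget : PySem.List.pyGetD L (-((E:Int)+1)) 0 = s := by
      rw [hneg, PySem.List.pyGetD_neg_natCast L (E+1) 0 (by omega) (by omega)]
      have hidx : L.length - (E+1) < M - E := by omega
      rw [List.getElem_append_left (by simp [hL]; omega)]
      simp
    rw [hget, hneg, pv_pySetD_neg_natCast L (E+1) (s+1) (by omega) (by omega)]
    apply List.ext_getElem
    · simp [hL]; omega
    · intro i h1 h2
      simp only [hL, List.getElem_set, List.getElem_append, List.getElem_replicate,
        List.length_replicate] at *
      split_ifs <;> first | rfl | omega

theorem pv_accum_fold (s : Int) (E M : Nat) (hE : E ≤ M) : ∀ (J : Nat), J ≤ M →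
    (PySem.List.pyRange 0 (J:Int) 1).foldl
      (fun (st : Int × List Int) i =>
        let time := st.1 + PySem.List.pyGetD (List.replicate (M-E) s ++ List.replicate E (s+1)) i 0
        (time, st.2 ++ [time])) (0, [(0:Int)])
    = ((J:Int) * s + max 0 ((J:Int) - ((M-E : Nat):Int)),
       (PySem.List.pyRange 0 ((J:Int)+1) 1).map
         (fun i => i * s + max 0 (i - ((M-E : Nat):Int)))) := by
  intro J
  induction J with
  | zero =>
    intro _
    have h1 : PySem.List.pyRange 0 1 1 = [(0:Int)] := by decide
    simp [PySem.List.pyRange_one_eq_nil, h1]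
  | succ J ih =>
    intro hJM
    have hcast : ((J+1 : Nat) : Int) = (J:Int) + 1 := by push_cast; ring
    rw [hcast, PySem.List.pyRange_one_succ_right (by positivity), List.foldl_append,
      ih (by omega)]
    simp only [List.foldl_cons, List.foldl_nil]
    set L := List.replicate (M-E) s ++ List.replicate E (s+1) with hL
    have hget : PySem.List.pyGetD L (J:Int) 0 = if J < M - E then s else s + 1 := by
      rw [PySem.List.pyGetD_natCast]
      have hlt : J < L.length := by simp [hL]; omega
      rw [List.getD_eq_getElem L 0 hlt]
      simp only [hL, List.getElem_append, List.getElem_replicate, List.length_replicate]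
      split_ifs <;> rfl
    rw [hget, Prod.mk.injEq]
    refine ⟨?_, ?_⟩
    · -- the accumulator equals the closed form at J+1
      have hr : ((J:Int)+1) * s = (J:Int) * s + s := by ring
      rw [hr]
      generalize (J:Int) * s = X
      split_ifs with h <;> omega
    · -- the list side
      rw [show (J:Int) + 1 + 1 = ((J:Int)+1) + 1 by ring,
        PySem.List.pyRange_one_succ_right (show (0:Int) ≤ (J:Int)+1 by positivity),
        PySem.List.pyRange_one_succ_right (show (0:Int) ≤ (J:Int) by positivity)]
      simp only [List.map_append, List.map_cons, List.map_nil]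
      congr 1
      congr 1
      have hr : ((J:Int)+1) * s = (J:Int) * s + s := by ring
      rw [hr]
      generalize (J:Int) * s = X
      split_ifs with h <;> omega

theorem pv_main (tp mf : Int) (hpre : min tp mf ≠ 1) :
    get_time_indexes tp mf = get_time_indexes_alt tp mf := by
  by_cases hf : 2 ≤ min mf tp
  · -- at least two frames: intervals table + prefix sums = closed form
    set frames := min mf tp with hfr
    set s := PySem.Int.floordiv (tp - 1) (frames - 1) with hs
    set e := PySem.Int.mod (tp - 1) (frames - 1) with he
    have hm : 0 < frames - 1 := by omega
    have he0 : 0 ≤ e := PySem.Int.mod_nonneg _ hm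
    have he1 : e < frames - 1 := PySem.Int.mod_lt _ hm
    set M := (frames - 1).toNat with hMdef
    have hM : (M:Int) = frames - 1 := by omega
    set E := e.toNat with hEdef
    have hE : (E:Int) = e := by omega
    have hEM : E ≤ M := by omega
    have hfold1 := pv_intervals_fold s E M hEM
    have hfold2 := pv_accum_fold s E M hEM M le_rfl
    simp only [get_time_indexes, get_time_indexes_alt, ← hfr, ← hs, ← he]
    rw [show PySem.List.pyRange 0 e 1 = PySem.List.pyRange 0 (E:Int) 1 by rw [hE],
      show (frames - 1).toNat = M from rfl, hfold1,
      show PySem.List.pyRange 0 (frames - 1) 1 = PySem.List.pyRange 0 (M:Int) 1 by rw [hM]]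
    rw [hfold2]
    rw [show frames = (M:Int) + 1 by omega]
    rw [show (M:Int) + 1 - 1 - e = ((M - E : Nat) : Int) by push_cast [hEM]; omega]
    rw [PySem.List.pyRange_one_cons (by positivity)]
    simp only [List.map_cons, zero_mul, zero_add, List.singleton_append, zero_sub]
    congr 1
    omega
  · -- a non-positive frame count: both sides collapse to [0]
    have hle : min mf tp ≤ 0 := by omega
    have hmodle : PySem.Int.mod (tp - 1) (min mf tp - 1) ≤ 0 :=
      (PySem.Int.mod_neg_bounds (tp - 1) (show min mf tp - 1 < 0 by omega)).2
    simp only [get_time_indexes, get_time_indexes_alt]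
    rw [PySem.List.pyRange_one_eq_nil hmodle,
      PySem.List.pyRange_one_eq_nil (show min mf tp - 1 ≤ 0 by omega),
      PySem.List.pyRange_one_eq_nil (show min mf tp ≤ 1 by omega),
      show (min mf tp - 1).toNat = 0 by omega]
    simp

-- ===== VERDICT (by name: the statement is the Claim_ definition above) =====
theorem get_time_indexes_spec : Claim_equal_get_time_indexes := by
  intro tp mf _ hpre
  exact pv_main tp mf hpre
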